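-- pv_equiv track=rewrite | github.com/earlham-sherlock/earlham-sherlock.github.io | loaders/gene_ontology/gene_ontology_loader.py | get_direct_children
-- ===== SOURCE A (Python) =====
-- def get_direct_children(parents_dictionary):
--
--     children_dictionary = {}
--
--     for keys, values in parents_dictionary.items():
--
--         for value in values:
--
--             if value not in children_dictionary:
--                 children_dictionary[value] = []
--
--             if keys not in children_dictionary[value]:
--                 children_dictionary[value].append(keys)
--
--     return children_dictionary
-- ===== SOURCE B (Python) =====
-- def get_direct_children(parents_dictionary):
--     # Invert without any accumulator dict: list the distinct child values in
--     # first-appearance order, then for each value re-scan the parents once,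
--     # collecting every key whose value list mentions it.
--     items = list(parents_dictionary.items())
--     order = list(dict.fromkeys(v for _, values in items for v in values))
--     return {v: [k for k, values in items if v in values] for v in order}
-- ===== Notes on version B (the rewrite author's own statement) =====
-- stated objective: alternative
-- what changed: A builds the inverted dict incrementally with an inline membership-checked append per (key,value) event; B builds no accumulator at all: it first computes the distinct values in first-appearance order and then constructs each child list by a fresh filter scan over the parents, trading speed for a loop-free comprehension form.
import Mathlib
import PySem

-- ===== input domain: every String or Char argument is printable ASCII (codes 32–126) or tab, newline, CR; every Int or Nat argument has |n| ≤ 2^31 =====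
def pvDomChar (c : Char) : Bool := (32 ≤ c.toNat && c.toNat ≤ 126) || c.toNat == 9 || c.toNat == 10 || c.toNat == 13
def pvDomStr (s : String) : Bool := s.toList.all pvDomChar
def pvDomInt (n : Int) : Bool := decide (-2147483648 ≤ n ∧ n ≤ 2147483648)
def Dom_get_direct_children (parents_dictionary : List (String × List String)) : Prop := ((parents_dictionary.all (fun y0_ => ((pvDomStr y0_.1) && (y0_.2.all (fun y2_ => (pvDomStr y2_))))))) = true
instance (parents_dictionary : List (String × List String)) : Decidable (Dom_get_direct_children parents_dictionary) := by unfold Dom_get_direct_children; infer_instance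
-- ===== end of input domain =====

-- ===== PORT A =====
-- A: fold over the (key, values) pairs, per value create the slot if missing and
-- append the key after an inline membership check.
def get_direct_children (parents_dictionary : List (String × List String)) : List (String × List String) :=
  (parents_dictionary.foldl (fun children p =>
      p.2.foldl (fun children value =>
        let children := if children.contains value then children
                        else children.insert value ([] : List String)
        let cur := children.getD value []
        if p.1 ∈ cur then children else children.insert value (cur ++ [p.1]))
        children)
    PySem.Dict.empty).items

-- ===== PORT B =====
-- B: no accumulator dict — distinct values in first-appearance order
-- (dict.fromkeys = PySem.List.dedup), then one filter scan of the parents per value.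
def get_direct_children_alt (parents_dictionary : List (String × List String)) : List (String × List String) :=
  let order := PySem.List.dedup (parents_dictionary.flatMap (fun p => p.2))
  order.map (fun v => (v, (parents_dictionary.filter (fun p => decide (v ∈ p.2))).map Prod.fst))

-- ===== PRECONDITION & SPEC =====
-- Pre_ excludes association lists with duplicate keys: they do not represent any Python
-- dict (parents_dictionary is a dict, whose keys are necessarily distinct), so no input
-- of the Python function is excluded.
def Pre_get_direct_children (parents_dictionary : List (String × List String)) : Prop :=
  (parents_dictionary.map Prod.fst).Nodup
instance (parents_dictionary : List (String × List String)) : Decidable (Pre_get_direct_children parents_dictionary) := by unfold Pre_get_direct_children; infer_instance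
def pvWitness_get_direct_children : (List (String × List String)) :=
  [("a", ["x", "y"]), ("b", ["x"])]
def Spec_get_direct_children (parents_dictionary : List (String × List String)) (out : List (String × List String)) : Prop := out = get_direct_children_alt parents_dictionary
instance (parents_dictionary : List (String × List String)) (out : List (String × List String)) : Decidable (Spec_get_direct_children parents_dictionary out) := by unfold Spec_get_direct_children; infer_instance

-- ===== CLAIM (what is proved, stated in full; the proofs are below) =====
def Claim_equal_get_direct_children : Prop := ∀ (parents_dictionary : List (String × List String)), Dom_get_direct_children parents_dictionary → Pre_get_direct_children parents_dictionary → Spec_get_direct_children parents_dictionary (get_direct_children parents_dictionary)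

-- ===== LEMMAS AND PROOFS =====

-- the per-value child list B computes
def pvKeys (pd : List (String × List String)) (v : String) : List String :=
  (pd.filter (fun p => decide (v ∈ p.2))).map Prod.fst

-- the dict state A's loop maintains, as a function of the flattened events seen so far:
-- after the pairs contributing values L and, inside the current pair (k, _), the value
-- prefix us, the dict maps each distinct value of L ++ us to its child list.
def pvSt (L : List String) (K : String → List String) (k : String) (us : List String) :
    PySem.Dict String (List String) :=
  PySem.Dict.mk ((PySem.Set.ofList (L ++ us)).map (fun v => (v, K v ++ if v ∈ us then [k] else [])))

theorem pv_get?_mk_map (S : List String) (g : String → List String) (x : String) :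
    (PySem.Dict.mk (S.map (fun v => (v, g v)))).get? x = if x ∈ S then some (g x) else none := by
  induction S with
  | nil => rfl
  | cons a S ih =>
    simp only [List.map_cons, PySem.Dict.get?_mk_cons, ih, List.mem_cons]
    by_cases h : a = x
    · subst h; simp
    · simp [h, Ne.symm h]

theorem pv_contains_mk_map (S : List String) (g : String → List String) (x : String) :
    (PySem.Dict.mk (S.map (fun v => (v, g v)))).contains x = decide (x ∈ S) := by
  rw [PySem.Dict.contains_eq_isSome_get?, pv_get?_mk_map]
  by_cases h : x ∈ S <;> simp [h]

theorem pv_getD_mk_map (S : List String) (g : String → List String) (x : String) (hx : x ∈ S) :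
    (PySem.Dict.mk (S.map (fun v => (v, g v)))).getD x [] = g x := by
  rw [PySem.Dict.getD_eq_get?_getD, pv_get?_mk_map, if_pos hx]; rfl

-- one step of A's inner loop advances the state by one value
theorem pv_step (L : List String) (K : String → List String) (k : String)
    (hK : ∀ w, k ∉ K w) (hK0 : ∀ w, w ∉ L → K w = []) (us : List String) (v : String) :
    (let c := if (pvSt L K k us).contains v then pvSt L K k us
              else (pvSt L K k us).insert v ([] : List String)
     let cur := c.getD v []
     if k ∈ cur then c else c.insert v (cur ++ [k])) = pvSt L K k (us ++ [v]) := by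
  have hset : PySem.Set.ofList (L ++ (us ++ [v]))
      = PySem.Set.add (PySem.Set.ofList (L ++ us)) v := by
    rw [← List.append_assoc, PySem.Set.ofList_append_singleton]
  by_cases hv : v ∈ L ++ us
  · have hmem : v ∈ PySem.Set.ofList (L ++ us) := (PySem.Set.mem_ofList _ _).mpr hv
    have hc : (pvSt L K k us).contains v = true := by
      rw [pvSt, pv_contains_mk_map]; exact decide_eq_true hmem
    have hcur : (pvSt L K k us).getD v [] = K v ++ if v ∈ us then [k] else [] := by
      rw [pvSt]; exact pv_getD_mk_map _ _ v hmem
    have hS : PySem.Set.ofList (L ++ (us ++ [v])) = PySem.Set.ofList (L ++ us) := by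
      rw [hset, PySem.Set.add_of_mem hmem]
    by_cases hvu : v ∈ us
    · -- the key is already recorded under v: both branches leave the dict unchanged
      have hk : k ∈ (pvSt L K k us).getD v [] := by rw [hcur, if_pos hvu]; simp
      simp only [hc, if_true, hk]
      rw [pvSt, pvSt, hS]
      congr 1
      apply List.map_congr_left
      intro w _
      by_cases hwv : w = v
      · subst hwv; simp [hvu]
      · simp [List.mem_append, hwv]
    · -- value known, key not yet recorded for it: in-place update of the entry
      have hk : k ∉ (pvSt L K k us).getD v [] := by
        rw [hcur, if_neg hvu, List.append_nil]; exact hK v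
      simp only [hc, if_true]
      rw [if_neg hk, hcur, if_neg hvu, List.append_nil]
      apply PySem.Dict.ext
      rw [PySem.Dict.items_insert_of_contains _ _ hc]
      show (pvSt L K k us).items.map _ = (pvSt L K k (us ++ [v])).items
      simp only [pvSt, hS]
      show (List.map _ _).map _ = List.map _ _
      rw [List.map_map]
      apply List.map_congr_left
      intro w _
      by_cases hwv : w = v
      · subst hwv; simp [hvu]
      · have hbv : (w == v) = false := by simp [hwv]
        simp [List.mem_append, hwv]
  · -- fresh value: slot created then key appended; the entry goes to the end
    have hnmem : v ∉ PySem.Set.ofList (L ++ us) := fun h => hv ((PySem.Set.mem_ofList _ _).mp h)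
    have hc : (pvSt L K k us).contains v = false := by
      rw [pvSt, pv_contains_mk_map]; exact decide_eq_false hnmem
    have hS : PySem.Set.ofList (L ++ (us ++ [v])) = PySem.Set.ofList (L ++ us) ++ [v] := by
      rw [hset, PySem.Set.add_of_not_mem hnmem]
    have hK0v : K v = [] := hK0 v (fun h => hv (List.mem_append.mpr (Or.inl h)))
    simp only [hc, Bool.false_eq_true, if_false]
    rw [PySem.Dict.getD_insert_self]
    simp only [List.not_mem_nil, if_false, List.nil_append]
    rw [PySem.Dict.insert_insert_self]
    apply PySem.Dict.ext
    rw [PySem.Dict.items_insert_of_not_contains _ _ hc]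
    show (pvSt L K k us).items ++ [(v, [k])] = (pvSt L K k (us ++ [v])).items
    simp only [pvSt, hS]
    show List.map _ _ ++ _ = List.map _ _
    rw [List.map_append]
    congr 1
    · apply List.map_congr_left
      intro w hw
      have hwv : w ≠ v := fun h => hnmem (h ▸ hw)
      simp [List.mem_append, hwv]
    · simp [hK0v]

-- A's inner loop over the remaining values vs, from the state after us
theorem pv_inner (L : List String) (K : String → List String) (k : String)
    (hK : ∀ w, k ∉ K w) (hK0 : ∀ w, w ∉ L → K w = []) (vs : List String) :
    ∀ us : List String,
    vs.foldl (fun c value =>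
        let c := if c.contains value then c else c.insert value ([] : List String)
        let cur := c.getD value []
        if k ∈ cur then c else c.insert value (cur ++ [k])) (pvSt L K k us)
      = pvSt L K k (us ++ vs) := by
  induction vs with
  | nil => intro us; simp
  | cons v vs ih =>
    intro us
    simp only [List.foldl_cons]
    rw [pv_step L K k hK hK0 us v, ih (us ++ [v]), List.append_assoc]
    rfl

-- A's whole loop computes, for each distinct value in flattening order, B's filter scan
theorem pv_main (pd : List (String × List String)) (hnd : (pd.map Prod.fst).Nodup) :
    pd.foldl (fun children p =>
      p.2.foldl (fun children value =>
        let children := if children.contains value then children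
                        else children.insert value ([] : List String)
        let cur := children.getD value []
        if p.1 ∈ cur then children else children.insert value (cur ++ [p.1]))
        children) PySem.Dict.empty
      = PySem.Dict.mk ((PySem.Set.ofList (pd.flatMap (fun p => p.2))).map
          (fun v => (v, pvKeys pd v))) := by
  induction pd using List.reverseRecOn with
  | nil => rfl
  | append_singleton pd p ih =>
    have hnd' : (pd.map Prod.fst).Nodup := by
      rw [List.map_append] at hnd; exact hnd.of_append_left
    have hfresh : p.1 ∉ pd.map Prod.fst := by
      rw [List.map_append] at hnd
      intro h
      exact (List.disjoint_of_nodup_append hnd) h (by simp)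
    have hK : ∀ w, p.1 ∉ pvKeys pd w := by
      intro w hmem
      exact hfresh (by
        rcases List.mem_map.mp hmem with ⟨q, hq, hq1⟩
        exact List.mem_map.mpr ⟨q, List.mem_of_mem_filter hq, hq1⟩)
    have hK0 : ∀ w, w ∉ pd.flatMap (fun q => q.2) → pvKeys pd w = [] := by
      intro w hw
      rw [pvKeys, List.map_eq_nil_iff, List.filter_eq_nil_iff]
      intro q hq hdec
      exact hw (List.mem_flatMap.mpr ⟨q, hq, of_decide_eq_true hdec⟩)
    rw [List.foldl_append, List.foldl_cons, List.foldl_nil, ih hnd']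
    have h0 : PySem.Dict.mk ((PySem.Set.ofList (pd.flatMap (fun q => q.2))).map
          (fun v => (v, pvKeys pd v))) = pvSt (pd.flatMap (fun q => q.2)) (pvKeys pd) p.1 [] := by
      rw [pvSt]
      simp
    rw [h0, pv_inner _ _ _ hK hK0 p.2 [], List.nil_append, pvSt]
    congr 1
    rw [List.flatMap_append]
    simp only [List.flatMap_cons, List.flatMap_nil, List.append_nil]
    apply List.map_congr_left
    intro w _
    have hkeys : pvKeys (pd ++ [p]) w = pvKeys pd w ++ if w ∈ p.2 then [p.1] else [] := by
      rw [pvKeys, pvKeys, List.filter_append, List.map_append]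
      congr 1
      by_cases hw : w ∈ p.2 <;> simp [hw]
    rw [hkeys]

-- ===== VERDICT (by name: the statement is the Claim_ definition above) =====
theorem get_direct_children_spec : Claim_equal_get_direct_children := by
  intro pd _ hpre
  unfold Spec_get_direct_children get_direct_children get_direct_children_alt
  rw [pv_main pd hpre]
  simp only [PySem.List.dedup_eq_ofList]
  rfl
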